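-- pv_equiv track=rewrite | github.com/JLcilliers/SEO-Content-Optimization | src/seo_content_optimizer/diff_markers.py | extract_unhighlighted_spans
-- ===== SOURCE A (Python) =====
-- MARK_START = "[[[ADD]]]"
--
-- MARK_END = "[[[ENDADD]]]"
--
-- def extract_unhighlighted_spans(marked_text: str) -> list[str]:
--     """
--     Extract all unhighlighted (non-marked) text spans from marked text.
--
--     Args:
--         marked_text: Text with [[[ADD]]]/[[[ENDADD]]] markers.
--
--     Returns:
--         List of text spans that are NOT inside markers.
--     """
--     if not marked_text:
--         return []
--
--     # Remove marked content and extract remaining spans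
--     result = []
--     current_pos = 0
--     text = marked_text
--
--     while True:
--         # Find next marker start
--         start_pos = text.find(MARK_START, current_pos)
--
--         if start_pos == -1:
--             # No more markers - rest is unhighlighted
--             remaining = text[current_pos:].strip()
--             if remaining:
--                 result.append(remaining)
--             break
--
--         # Extract unhighlighted span before marker
--         span = text[current_pos:start_pos].strip()
--         if span:
--             result.append(span)
--
--         # Find marker end
--         end_pos = text.find(MARK_END, start_pos)
--         if end_pos == -1:
--             # Malformed markers - stop
--             break
--
--         current_pos = end_pos + len(MARK_END)
--
--     return result
-- ===== SOURCE B (Python) =====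
-- MARK_START = "[[[ADD]]]"
--
-- MARK_END = "[[[ENDADD]]]"
--
--
-- def extract_unhighlighted_spans(marked_text: str) -> list[str]:
--     """Single left-to-right state-machine pass: collect characters while outside
--     markers, flush the stripped buffer at each [[[ADD]]] and at the end."""
--     spans = []
--     buf = []
--     inside = False
--     i = 0
--     n = len(marked_text)
--     while i < n:
--         if inside:
--             if marked_text.startswith(MARK_END, i):
--                 inside = False
--                 i += len(MARK_END)
--             else:
--                 i += 1
--         else:
--             if marked_text.startswith(MARK_START, i):
--                 s = "".join(buf).strip()
--                 if s:
--                     spans.append(s)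
--                 buf = []
--                 inside = True
--                 i += len(MARK_START)
--             else:
--                 buf.append(marked_text[i])
--                 i += 1
--     if not inside:
--         s = "".join(buf).strip()
--         if s:
--             spans.append(s)
--     return spans
-- ===== Notes on version B (the rewrite author's own statement) =====
-- stated objective: alternative
-- what changed: Replaces A's find()-based jumping scan (repeatedly searching the whole text for the next marker and slicing between positions) with a single character-by-character state-machine pass maintaining an inside flag and a span buffer.
import Mathlib
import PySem

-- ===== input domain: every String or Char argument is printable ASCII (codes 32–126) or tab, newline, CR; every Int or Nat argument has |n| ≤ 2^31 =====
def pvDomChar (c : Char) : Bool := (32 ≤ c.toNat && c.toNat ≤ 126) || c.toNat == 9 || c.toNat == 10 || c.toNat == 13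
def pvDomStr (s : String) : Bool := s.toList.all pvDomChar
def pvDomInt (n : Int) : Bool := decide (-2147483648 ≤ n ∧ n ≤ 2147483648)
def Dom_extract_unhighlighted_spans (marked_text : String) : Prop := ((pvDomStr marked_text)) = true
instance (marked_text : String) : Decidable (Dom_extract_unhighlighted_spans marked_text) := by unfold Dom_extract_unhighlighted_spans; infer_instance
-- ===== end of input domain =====

-- B replaces A's find()-based jumping scan with a single character-by-character
-- state-machine pass (same asymptotic cost; no speed claim).

-- MARK_START / MARK_END
def pvMS : List Char := "[[[ADD]]]".toList
def pvME : List Char := "[[[ENDADD]]]".toList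

-- ===== PORT A =====
-- totality bound for A's loop, cited by the port's termination proof
lemma pvA_bounds (text : List Char) (cur : Nat) (hcur : cur ≤ text.length)
    (hs : PySem.Chars.findFrom text pvMS (cur : Int) ≠ -1)
    (he : PySem.Chars.findFrom text pvME (PySem.Chars.findFrom text pvMS (cur : Int)) ≠ -1) :
    cur < (PySem.Chars.findFrom text pvME (PySem.Chars.findFrom text pvMS (cur : Int))).toNat + 12 ∧
    (PySem.Chars.findFrom text pvME (PySem.Chars.findFrom text pvMS (cur : Int))).toNat + 12 ≤ text.length := by
  have h1 := PySem.Chars.findFrom_natCast_spec text pvMS cur hcur hs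
  have hs0 : (0 : Int) ≤ PySem.Chars.findFrom text pvMS (cur : Int) :=
    le_trans (Int.natCast_nonneg cur) h1.1
  obtain ⟨k, hk⟩ : ∃ kk : Nat, PySem.Chars.findFrom text pvMS (cur : Int) = (kk : Int) :=
    ⟨_, (Int.toNat_of_nonneg hs0).symm⟩
  rw [hk] at h1 he ⊢
  have hkc : cur ≤ k := by exact_mod_cast h1.1
  have hkl : k + 9 ≤ text.length := by
    have h9 : pvMS.length = 9 := by decide
    have := h1.2.1.length_le
    simp [List.length_drop, h9] at this
    omega
  have h2 := PySem.Chars.findFrom_natCast_spec text pvME k (by omega) he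
  have he0 : (0 : Int) ≤ PySem.Chars.findFrom text pvME (k : Int) :=
    le_trans (Int.natCast_nonneg k) h2.1
  obtain ⟨m, hm⟩ : ∃ mm : Nat, PySem.Chars.findFrom text pvME (k : Int) = (mm : Int) :=
    ⟨_, (Int.toNat_of_nonneg he0).symm⟩
  rw [hm] at h2 ⊢
  have hkm : k ≤ m := by exact_mod_cast h2.1
  have hml : m + 12 ≤ text.length := by
    have h12 : pvME.length = 12 := by decide
    have := h2.2.1.length_le
    simp [List.length_drop, h12] at this
    omega
  simp only [Int.toNat_natCast]
  omega

-- A's `while True` loop over (text, current_pos); the `hcur` argument is only a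
-- totality guard (current_pos never exceeds len(text)); `result` is the list built so far.
def pvALoop (text : List Char) (result : List String) (cur : Nat) (hcur : cur ≤ text.length) : List String :=
  -- start_pos = text.find(MARK_START, current_pos)
  let start := PySem.Chars.findFrom text pvMS (cur : Int)
  if hs : start = -1 then
    -- remaining = text[current_pos:].strip(); if remaining: result.append(remaining)
    let remaining := PySem.Chars.strip (PySem.List.slice text (some (cur : Int)) none)
    if remaining = [] then result else result ++ [String.ofList remaining]
  else
    -- span = text[current_pos:start_pos].strip(); if span: result.append(span)
    let span := PySem.Chars.strip (PySem.List.slice text (some (cur : Int)) (some start))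
    let result' := if span = [] then result else result ++ [String.ofList span]
    -- end_pos = text.find(MARK_END, start_pos)
    let endp := PySem.Chars.findFrom text pvME start
    if he : endp = -1 then result'
    else
      pvALoop text result' (endp.toNat + 12) (pvA_bounds text cur hcur hs he).2
termination_by text.length - cur
decreasing_by
  have h := pvA_bounds text cur hcur hs he
  omega

def extract_unhighlighted_spans (marked_text : String) : List String :=
  if marked_text.toList = [] then []
  else pvALoop marked_text.toList [] 0 (Nat.zero_le _)

-- ===== PORT B =====
-- B's single state-machine pass: `i += k` becomes recursion on the dropped suffix.
def pvBLoop (cs : List Char) (inside : Bool) (buf : List Char) (spans : List String) : List String :=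
  match cs with
  | [] =>
    -- after the loop: if not inside, flush the stripped buffer
    if inside then spans
    else
      let s := PySem.Chars.strip buf
      if s = [] then spans else spans ++ [String.ofList s]
  | c :: rest =>
    if inside then
      if PySem.Chars.startswith (c :: rest) pvME then
        pvBLoop ((c :: rest).drop 12) false buf spans
      else
        pvBLoop rest true buf spans
    else
      if PySem.Chars.startswith (c :: rest) pvMS then
        let s := PySem.Chars.strip buf
        let spans' := if s = [] then spans else spans ++ [String.ofList s]
        pvBLoop ((c :: rest).drop 9) true [] spans'
      else
        pvBLoop rest false (buf ++ [c]) spans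
termination_by cs.length
decreasing_by all_goals (simp [List.length_drop]; try omega)

def extract_unhighlighted_spans_alt (marked_text : String) : List String :=
  pvBLoop marked_text.toList false [] []

-- ===== PRECONDITION & SPEC =====
def Spec_extract_unhighlighted_spans (marked_text : String) (out : List String) : Prop := out = extract_unhighlighted_spans_alt marked_text
instance (marked_text : String) (out : List String) : Decidable (Spec_extract_unhighlighted_spans marked_text out) := by unfold Spec_extract_unhighlighted_spans; infer_instance

-- ===== CLAIM (what is proved, stated in full; the proofs are below) =====
def Claim_equal_extract_unhighlighted_spans : Prop := ∀ (marked_text : String), Dom_extract_unhighlighted_spans marked_text → Spec_extract_unhighlighted_spans marked_text (extract_unhighlighted_spans marked_text)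

-- ===== LEMMAS AND PROOFS =====

-- common reference: the list of stripped gap spans of `cs`
def pvFlush (cs : List Char) : List String :=
  let s := PySem.Chars.strip cs
  if s = [] then [] else [String.ofList s]

def pvR (cs : List Char) : List String :=
  let j := PySem.Chars.find cs pvMS
  if _hj : j = -1 then pvFlush cs
  else
    let rest := cs.drop j.toNat
    let e := PySem.Chars.find rest pvME
    pvFlush (cs.take j.toNat) ++
      (if he : e = -1 then [] else pvR (rest.drop (e.toNat + 12)))
termination_by cs.length
decreasing_by
  have hj0 : (0:Int) ≤ j := by have := PySem.Chars.neg_one_le_find cs pvMS; omega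
  have hjs := PySem.Chars.find_spec (s := cs) (sub := pvMS) hj0
  have hjl := hjs.1.length_le
  have h9 : pvMS.length = 9 := by decide
  simp [List.length_drop, h9] at hjl
  have he0 : (0:Int) ≤ e := by have := PySem.Chars.neg_one_le_find rest pvME; omega
  have hes := PySem.Chars.find_spec (s := rest) (sub := pvME) he0
  have hel := hes.1.length_le
  have h12 : pvME.length = 12 := by decide
  simp [List.length_drop, h12] at hel
  simp [List.length_drop]
  omega

lemma pv_find_eq_first (cs sub : List Char) (j : Nat) (_hne : sub ≠ [])
    (hj : sub <+: cs.drop j) (hmin : ∀ i < j, ¬ sub <+: cs.drop i) :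
    PySem.Chars.find cs sub = (j : Int) := by
  have hinf : sub <:+: cs := hj.isInfix.trans (List.drop_suffix j cs).isInfix
  have hne1 : PySem.Chars.find cs sub ≠ -1 := (PySem.Chars.find_ne_neg_one_iff cs sub).mpr hinf
  have h0 : (0:Int) ≤ PySem.Chars.find cs sub := by
    have := PySem.Chars.neg_one_le_find cs sub; omega
  have hsp := PySem.Chars.find_spec (s := cs) (sub := sub) h0
  have : (PySem.Chars.find cs sub).toNat = j := by
    rcases lt_trichotomy (PySem.Chars.find cs sub).toNat j with h | h | h
    · exact absurd hsp.1 (hmin _ h)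
    · exact h
    · exact absurd hj (hsp.2 j h)
  omega

lemma pv_find_shift (cs sub : List Char) (k : Nat) (hne : sub ≠ [])
    (hno : ∀ p < k, ¬ sub <+: cs.drop p) :
    PySem.Chars.find cs sub =
      (if PySem.Chars.find (cs.drop k) sub = -1 then -1
       else PySem.Chars.find (cs.drop k) sub + k) := by
  split
  · next h =>
    rw [PySem.Chars.find_eq_neg_one_iff] at h ⊢
    intro hinf
    obtain ⟨p, hp⟩ := (PySem.Chars.exists_prefix_drop_iff_isIn sub cs).mpr
      ((PySem.Chars.isIn_iff_infix sub cs).mpr hinf)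
    rcases lt_or_ge p k with hpk | hpk
    · exact hno p hpk hp
    · exact h (by
        have : cs.drop p = (cs.drop k).drop (p - k) := by
          rw [List.drop_drop]; congr 1; omega
        rw [this] at hp
        exact hp.isInfix.trans (List.drop_suffix _ _).isInfix)
  · next h =>
    have h0 : (0:Int) ≤ PySem.Chars.find (cs.drop k) sub := by
      have := PySem.Chars.neg_one_le_find (cs.drop k) sub; omega
    have hsp := PySem.Chars.find_spec (s := cs.drop k) (sub := sub) h0
    have heq : PySem.Chars.find cs sub = ((k + (PySem.Chars.find (cs.drop k) sub).toNat : Nat) : Int) := by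
      apply pv_find_eq_first cs sub _ hne
      · have : List.drop (k + (PySem.Chars.find (List.drop k cs) sub).toNat) cs
            = List.drop (PySem.Chars.find (List.drop k cs) sub).toNat (List.drop k cs) := by
          rw [List.drop_drop]
        rw [this]; exact hsp.1
      · intro i hik
        rcases lt_or_ge i k with h1 | h1
        · exact hno i h1
        · intro hpre
          apply hsp.2 (i - k) (by omega)
          rw [List.drop_drop]
          have h2 : k + (i - k) = i := by omega
          rw [h2]; exact hpre
    rw [heq]; push_cast; omega

-- no MARK_END occurrence can begin inside a MARK_START occurrence
lemma pv_no_early_end (cs : List Char) (p : Nat) (hp : p < 9) (h : pvMS <+: cs) :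
    ¬ pvME <+: cs.drop p := by
  intro h2
  obtain ⟨t, ht⟩ := h
  subst ht
  rw [List.drop_append_of_le_length (by simp [pvMS]; omega : p ≤ pvMS.length)] at h2
  have ha : pvME.take (9 - p) <+: pvMS.drop p ++ t :=
    (List.take_prefix _ _).trans h2
  have hb : pvMS.drop p <+: pvMS.drop p ++ t := List.prefix_append _ _
  have hlen : (pvME.take (9 - p)).length = (pvMS.drop p).length := by
    simp [List.length_take, List.length_drop]
    have : pvME.length = 12 := by decide
    have : pvMS.length = 9 := by decide
    omega
  have key : pvME.take (9 - p) = pvMS.drop p :=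
    List.IsPrefix.eq_of_length (List.prefix_of_prefix_length_le ha hb (le_of_eq hlen)) hlen
  interval_cases p <;> exact absurd key (by decide)

-- A's loop computes pvR of the remaining suffix
lemma pvA_find (text sub : List Char) (L k : Nat) (hL : sub.length = L) (hk : k ≤ text.length) :
    (PySem.Chars.findFrom text sub (k : Int) = -1 ∧ PySem.Chars.find (text.drop k) sub = -1) ∨
    (∃ j : Nat, PySem.Chars.find (text.drop k) sub = (j : Int) ∧
      PySem.Chars.findFrom text sub (k : Int) = ((k + j : Nat) : Int) ∧ k + j + L ≤ text.length) := by
  have hb := PySem.Chars.findFrom_natCast text sub k hk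
  by_cases hf : PySem.Chars.find (text.drop k) sub = -1
  · exact Or.inl ⟨by rw [hb, if_pos hf], hf⟩
  · right
    have h0 : (0:Int) ≤ PySem.Chars.find (text.drop k) sub := by
      have := PySem.Chars.neg_one_le_find (text.drop k) sub; omega
    obtain ⟨j, hj⟩ : ∃ j : Nat, PySem.Chars.find (text.drop k) sub = (j : Int) :=
      ⟨_, (Int.toNat_of_nonneg h0).symm⟩
    refine ⟨j, hj, ?_, ?_⟩
    · rw [hb, if_neg hf, hj]; push_cast; ring
    · have hsp := (PySem.Chars.find_spec (s := text.drop k) (sub := sub) h0).1.length_le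
      rw [hj] at hsp
      simp [List.length_drop, hL, Int.toNat_natCast] at hsp
      have hjl := PySem.Chars.find_le_length (text.drop k) sub
      rw [hj] at hjl
      simp [List.length_drop] at hjl
      omega

lemma pvALoop_eq (text : List Char) : ∀ (spans : List String) (cur : Nat) (hcur : cur ≤ text.length),
    pvALoop text spans cur hcur = spans ++ pvR (text.drop cur) := by
  intro spans cur hcur
  induction spans, cur, hcur using pvALoop.induct with
  | case1 result cur hcur _s hs _rem hrem =>
    have hs' : PySem.Chars.findFrom text pvMS (cur : Int) = -1 := hs
    rcases pvA_find text pvMS 9 cur (by decide) hcur with ⟨_, hf⟩ | ⟨j, hj, hff, _⟩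
    · rw [pvALoop, dif_pos hs', pvR, dif_pos hf]
      rw [PySem.List.slice_from text (Int.natCast_nonneg cur), Int.toNat_natCast]
      unfold pvFlush
      by_cases hR : PySem.Chars.strip (List.drop cur text) = [] <;> simp [hR]
    · rw [hff] at hs'; exact absurd hs' (by omega)
  | case2 result cur hcur _s hs _rem hrem =>
    have hs' : PySem.Chars.findFrom text pvMS (cur : Int) = -1 := hs
    rcases pvA_find text pvMS 9 cur (by decide) hcur with ⟨_, hf⟩ | ⟨j, hj, hff, _⟩
    · rw [pvALoop, dif_pos hs', pvR, dif_pos hf]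
      rw [PySem.List.slice_from text (Int.natCast_nonneg cur), Int.toNat_natCast]
      unfold pvFlush
      by_cases hR : PySem.Chars.strip (List.drop cur text) = [] <;> simp [hR]
    · rw [hff] at hs'; exact absurd hs' (by omega)
  | case3 result cur hcur _s hs _e he =>
    have hs' : ¬ PySem.Chars.findFrom text pvMS (cur : Int) = -1 := hs
    have he' : PySem.Chars.findFrom text pvME (PySem.Chars.findFrom text pvMS (cur : Int)) = -1 := he
    rcases pvA_find text pvMS 9 cur (by decide) hcur with ⟨hff, _⟩ | ⟨j, hj, hff, hjl⟩
    · exact absurd hff hs'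
    have he2 : PySem.Chars.findFrom text pvME (PySem.Chars.findFrom text pvMS (cur : Int)) = -1 := he
    rw [hff] at he'
    rcases pvA_find text pvME 12 (cur + j) (by decide) (by omega) with ⟨hmf1, hm⟩ | ⟨m, hm, hmf, _⟩
    · rw [pvALoop, dif_neg hs', dif_pos he2, hff]
      rw [pvR, dif_neg (by simp [hj] : ¬ PySem.Chars.find (List.drop cur text) pvMS = -1)]
      simp only [hj, Int.toNat_natCast, List.drop_drop, hm, dif_pos]
      rw [PySem.List.slice_natCast text cur (cur + j), Nat.add_sub_cancel_left]
      unfold pvFlush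
      by_cases hR : PySem.Chars.strip (List.take j (List.drop cur text)) = [] <;> simp [hR]
    · rw [hmf] at he'; exact absurd he' (by omega)
  | case4 result cur hcur _s hs _span _result' _e he IH =>
    have hs' : ¬ PySem.Chars.findFrom text pvMS (cur : Int) = -1 := hs
    have he' : ¬ PySem.Chars.findFrom text pvME (PySem.Chars.findFrom text pvMS (cur : Int)) = -1 := he
    rcases pvA_find text pvMS 9 cur (by decide) hcur with ⟨hff, _⟩ | ⟨j, hj, hff, hjl⟩
    · exact absurd hff hs'
    have he'' := he'
    rw [hff] at he''
    rcases pvA_find text pvME 12 (cur + j) (by decide) (by omega) with ⟨hmf1, _⟩ | ⟨m, hm, hmf, hml⟩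
    · exact absurd hmf1 he''
    have hE : _e = ((cur + j + m : Nat) : Int) := by
      show PySem.Chars.findFrom text pvME (PySem.Chars.findFrom text pvMS (cur : Int)) = _
      rw [hff, hmf]
    have hRes : _result' = result ++ pvFlush (List.take j (List.drop cur text)) := by
      show (if PySem.Chars.strip (PySem.List.slice text (some (cur : Int))
                (some (PySem.Chars.findFrom text pvMS (cur : Int)))) = [] then result
            else result ++ [String.ofList (PySem.Chars.strip (PySem.List.slice text (some (cur : Int))
                (some (PySem.Chars.findFrom text pvMS (cur : Int)))))]) = _
      rw [hff, PySem.List.slice_natCast text cur (cur + j), Nat.add_sub_cancel_left]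
      unfold pvFlush
      by_cases hR : PySem.Chars.strip (List.take j (List.drop cur text)) = [] <;> simp [hR]
    have hRHS : pvR (List.drop cur text)
        = pvFlush (List.take j (List.drop cur text)) ++ pvR (List.drop (cur + j + m + 12) text) := by
      rw [pvR, dif_neg (by simp [hj] : ¬ PySem.Chars.find (List.drop cur text) pvMS = -1)]
      simp only [hj, Int.toNat_natCast, List.drop_drop, hm]
      rw [dif_neg (by omega : ¬ ((m : Int) = -1))]
      congr 1
    rw [pvALoop, dif_neg hs', dif_neg he']
    change pvALoop text _result' (_e.toNat + 12) _ = result ++ pvR (List.drop cur text)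
    rw [IH, hRes, hE, Int.toNat_natCast, hRHS]
    simp [List.append_assoc]

-- B's loop computes pvR as well (outside / inside states)
lemma pv_find_nil (sub : List Char) (hne : sub ≠ []) : PySem.Chars.find [] sub = -1 := by
  rw [PySem.Chars.find_eq_neg_one_iff]
  intro h
  exact hne (List.eq_nil_of_infix_nil h)

lemma pv_find_buf_neg (buf : List Char) (sub : List Char) (hne : sub ≠ [])
    (hno : ∀ p < buf.length, ¬ sub <+: buf.drop p) : PySem.Chars.find buf sub = -1 := by
  rw [PySem.Chars.find_eq_neg_one_iff]
  intro hinf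
  obtain ⟨p, hp⟩ := (PySem.Chars.exists_prefix_drop_iff_isIn sub buf).mpr
    ((PySem.Chars.isIn_iff_infix sub buf).mpr hinf)
  rcases lt_or_ge p buf.length with h1 | h1
  · exact hno p h1 hp
  · rw [List.drop_eq_nil_of_le h1] at hp
    exact hne (List.prefix_nil.mp hp)

lemma pvBLoop_eq_nil (buf : List Char) (spans : List String)
    (hinv : ∀ p < buf.length, ¬ pvMS <+: (buf ++ ([] : List Char)).drop p) :
    pvBLoop [] false buf spans = spans ++ pvR (buf ++ []) := by
  have hfind : PySem.Chars.find (buf ++ []) pvMS = -1 := by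
    rw [List.append_nil]
    exact pv_find_buf_neg buf pvMS (by decide) (by simpa using hinv)
  rw [pvBLoop, pvR, dif_pos hfind]
  unfold pvFlush
  rw [List.append_nil]
  simp only [Bool.false_eq_true, if_false]
  split <;> simp

lemma pvBLoop_eq_nil_in (spans : List String) :
    pvBLoop [] true [] spans =
      spans ++ (if PySem.Chars.find ([] : List Char) pvME = -1 then []
                else pvR (List.drop ((PySem.Chars.find ([] : List Char) pvME).toNat + 12) [])) := by
  rw [pvBLoop, if_pos (pv_find_nil pvME (by decide))]
  simp

lemma pvBLoop_eq (n : Nat) : ∀ (cs : List Char), cs.length ≤ n →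
    (∀ (buf : List Char) (spans : List String),
       (∀ p < buf.length, ¬ pvMS <+: (buf ++ cs).drop p) →
       pvBLoop cs false buf spans = spans ++ pvR (buf ++ cs)) ∧
    (∀ (spans : List String),
       pvBLoop cs true [] spans =
         spans ++ (if PySem.Chars.find cs pvME = -1 then []
                   else pvR (cs.drop ((PySem.Chars.find cs pvME).toNat + 12)))) := by
  induction n with
  | zero =>
    intro cs hlen
    have hcs : cs = [] := List.eq_nil_of_length_eq_zero (by omega)
    subst hcs
    exact ⟨fun buf spans hinv => pvBLoop_eq_nil buf spans hinv, pvBLoop_eq_nil_in⟩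
  | succ n IH =>
    intro cs hlen
    match cs with
    | [] =>
      exact ⟨fun buf spans hinv => pvBLoop_eq_nil buf spans hinv, pvBLoop_eq_nil_in⟩
    | c :: rest =>
      constructor
      · intro buf spans hinv
        rw [pvBLoop]
        simp only [Bool.false_eq_true, if_false]
        by_cases hsw : PySem.Chars.startswith (c :: rest) pvMS = true
        · have hpre : pvMS <+: (c :: rest) := (PySem.Chars.startswith_iff _ _).mp hsw
          have hfind : PySem.Chars.find (buf ++ c :: rest) pvMS = (buf.length : Int) := by
            apply pv_find_eq_first _ _ _ (by decide)
            · rw [List.drop_left]; exact hpre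
            · exact hinv
          rw [if_pos hsw]
          have hspans' : (if PySem.Chars.strip buf = [] then spans
              else spans ++ [String.ofList (PySem.Chars.strip buf)]) = spans ++ pvFlush buf := by
            unfold pvFlush; split <;> simp_all
          rw [pvR]
          rw [dif_neg (by rw [hfind]; omega), hfind]
          simp only [Int.toNat_natCast, List.drop_left, List.take_left]
          -- the END search may start inside the 9 marker characters; shift it past them
          have hshift := pv_find_shift (c :: rest) pvME 9 (by decide)
            (fun p hp => pv_no_early_end (c :: rest) p hp hpre)
          have hIH := (IH ((c :: rest).drop 9) (by simp at hlen ⊢; omega)).2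
            (if PySem.Chars.strip buf = [] then spans else spans ++ [String.ofList (PySem.Chars.strip buf)])
          rw [hIH, hspans']
          by_cases he' : PySem.Chars.find ((c :: rest).drop 9) pvME = -1
          · rw [if_pos he', hshift, if_pos he', dif_pos rfl]
            simp
          · have he0 : (0:Int) ≤ PySem.Chars.find ((c :: rest).drop 9) pvME := by
              have := PySem.Chars.neg_one_le_find ((c :: rest).drop 9) pvME; omega
            rw [if_neg he', hshift, if_neg he']
            rw [dif_neg (by omega)]
            have hdrop : (c :: rest).drop ((PySem.Chars.find ((c :: rest).drop 9) pvME + ((9:Nat):Int)).toNat + 12)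
                = ((c :: rest).drop 9).drop ((PySem.Chars.find ((c :: rest).drop 9) pvME).toNat + 12) := by
              rw [List.drop_drop]
              congr 1
              omega
            rw [hdrop]
            simp
        · rw [if_neg hsw]
          have hIH := (IH rest (by simp at hlen; omega)).1 (buf ++ [c]) spans
          rw [show (buf ++ [c]) ++ rest = buf ++ c :: rest by simp] at hIH
          apply hIH
          intro p hp
          simp only [List.length_append, List.length_cons, List.length_nil] at hp
          rcases lt_or_ge p buf.length with h1 | h1
          · exact hinv p h1
          · have hpb : p = buf.length := by omega
            subst hpb
            rw [List.drop_left]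
            rw [← PySem.Chars.startswith_iff]
            simp [hsw]
      · intro spans
        rw [pvBLoop]
        rw [if_pos rfl]
        by_cases hsw : PySem.Chars.startswith (c :: rest) pvME = true
        · have hpre : pvME <+: (c :: rest) := (PySem.Chars.startswith_iff _ _).mp hsw
          have hfind : PySem.Chars.find (c :: rest) pvME = ((0 : Nat) : Int) := by
            apply pv_find_eq_first _ _ _ (by decide)
            · simpa using hpre
            · omega
          rw [if_pos hsw]
          have hIH := (IH ((c :: rest).drop 12) (by simp at hlen ⊢; omega)).1 [] spans (by simp)
          rw [hIH, hfind]
          norm_num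
        · have hshift := pv_find_shift (c :: rest) pvME 1 (by decide)
            (by intro p hp
                interval_cases p
                rw [List.drop_zero, ← PySem.Chars.startswith_iff]
                simp [hsw])
          rw [if_neg hsw]
          have hIH := (IH rest (by simp at hlen; omega)).2 spans
          rw [hIH, hshift, List.drop_one, List.tail_cons]
          by_cases he' : PySem.Chars.find rest pvME = -1
          · simp [he']
          · have he0 : (0:Int) ≤ PySem.Chars.find rest pvME := by
              have := PySem.Chars.neg_one_le_find rest pvME; omega
            simp only [if_neg he']
            rw [if_neg (by omega : ¬ (PySem.Chars.find rest pvME + ((1:Nat):Int) = -1))]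
            have hdrop : (c :: rest).drop ((PySem.Chars.find rest pvME + ((1:Nat):Int)).toNat + 12)
                = rest.drop ((PySem.Chars.find rest pvME).toNat + 12) := by
              have h1 : (PySem.Chars.find rest pvME + ((1:Nat):Int)).toNat + 12
                  = ((PySem.Chars.find rest pvME).toNat + 12) + 1 := by omega
              rw [h1, List.drop_succ_cons]
            rw [hdrop]

-- ===== VERDICT (by name: the statement is the Claim_ definition above) =====
theorem extract_unhighlighted_spans_spec : Claim_equal_extract_unhighlighted_spans := by
  intro s _
  unfold Spec_extract_unhighlighted_spans extract_unhighlighted_spans extract_unhighlighted_spans_alt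
  by_cases h : s.toList = []
  · simp [h, pvBLoop]
    decide
  · have hA := pvALoop_eq s.toList [] 0 (Nat.zero_le _)
    have hB := (pvBLoop_eq s.toList.length s.toList le_rfl).1 [] []
      (by intro p hp; simp at hp)
    rw [if_neg h, hA, hB]
    simp
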